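-- pv_equiv track=rewrite | github.com/sokancha/Algorithm_study | 4week/4week_5.py | solution
-- ===== SOURCE A (Python) =====
-- def solution(numbers, k):
--     answer = 0
--     n  = 0 #공을 던지는 횟수
--     a = 0 #던지는 사람의 순서
--     while True :
--         n += 1
--         if n == k :
--             answer = numbers[a]
--             break
--         elif len(numbers[a:]) >= 3 :
--             a += 2
--         elif n != k and len(numbers[a:]) == 2 :
--             a = 0
--         elif n != k and len(numbers[a:]) == 1 :
--             a = 1
--     return answer
-- ===== SOURCE B (Python) =====
-- def solution(numbers, k):
--     # Positions form the arithmetic cycle a_t = 2*(t-1) mod len(numbers):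
--     # each throw moves the index by +2 modulo the number of players.
--     return numbers[(2 * (k - 1)) % len(numbers)]
-- ===== Notes on version B (the rewrite author's own statement) =====
-- stated objective: faster
-- what changed: Replaces the O(k) throw-by-throw while-loop with the closed form numbers[(2*(k-1)) % len(numbers)], since every step of A moves the index by +2 modulo len(numbers).
import Mathlib
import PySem

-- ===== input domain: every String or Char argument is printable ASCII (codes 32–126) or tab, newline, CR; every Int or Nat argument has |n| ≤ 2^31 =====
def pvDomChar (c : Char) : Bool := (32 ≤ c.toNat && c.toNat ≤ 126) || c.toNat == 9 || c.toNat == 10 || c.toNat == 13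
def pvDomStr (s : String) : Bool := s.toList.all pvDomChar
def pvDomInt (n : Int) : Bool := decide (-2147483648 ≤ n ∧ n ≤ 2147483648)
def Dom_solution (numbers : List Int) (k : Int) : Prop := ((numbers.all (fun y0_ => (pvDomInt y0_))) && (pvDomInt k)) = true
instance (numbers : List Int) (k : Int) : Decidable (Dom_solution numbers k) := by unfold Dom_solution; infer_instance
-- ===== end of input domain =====

-- B replaces A's throw-by-throw while-loop with the closed form numbers[(2*(k-1)) % len(numbers)].

-- ===== PORT A =====
-- A's `while True` loop runs exactly k iterations (n counts 1..k); fuel = remaining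
-- iterations, so fuel = 1 is the `n == k` break. The redundant `n != k` conjuncts of the
-- Python elif branches are already guaranteed false-free here (the first `if` failed).
def solutionGo (numbers : List Int) (a : Int) : Nat → Int
  | 0 => 0  -- unreachable under Pre_ (Python diverges for k ≤ 0)
  | r + 1 =>
    if r = 0 then (PySem.List.pyGet? numbers a).getD 0
    else if 3 ≤ (PySem.List.slice numbers (some a) none).length then
      solutionGo numbers (a + 2) r
    else if (PySem.List.slice numbers (some a) none).length = 2 then
      solutionGo numbers 0 r
    else if (PySem.List.slice numbers (some a) none).length = 1 then
      solutionGo numbers 1 r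
    else
      solutionGo numbers a r

def solution (numbers : List Int) (k : Int) : Int :=
  solutionGo numbers 0 k.toNat

-- ===== PORT B =====
def solution_alt (numbers : List Int) (k : Int) : Int :=
  (PySem.List.pyGet? numbers (PySem.Int.mod (2 * (k - 1)) (numbers.length : Int))).getD 0

-- ===== PRECONDITION & SPEC =====
-- Exactly where Python A returns: for k ≤ 0 the loop never breaks (diverges); for an empty
-- list (and for a one-element list with k ≥ 2) the break line `numbers[a]` raises IndexError.
def Pre_solution (numbers : List Int) (k : Int) : Prop :=
  1 ≤ k ∧ (2 ≤ numbers.length ∨ (numbers.length = 1 ∧ k = 1))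
instance (numbers : List Int) (k : Int) : Decidable (Pre_solution numbers k) := by
  unfold Pre_solution; infer_instance
def pvWitness_solution : List Int × Int := ([10, 20, 30, 40, 50], 7)

def Spec_solution (numbers : List Int) (k : Int) (out : Int) : Prop := out = solution_alt numbers k
instance (numbers : List Int) (k : Int) (out : Int) : Decidable (Spec_solution numbers k out) := by unfold Spec_solution; infer_instance

-- ===== CLAIM (what is proved, stated in full; the proofs are below) =====
def Claim_equal_solution : Prop := ∀ (numbers : List Int) (k : Int), Dom_solution numbers k → Pre_solution numbers k → Spec_solution numbers k (solution numbers k)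

-- ===== LEMMAS AND PROOFS =====

-- One iteration of A's loop body maps the index a to (a + 2) % n, and the invariant
-- 0 ≤ a < n is preserved; so after r further iterations the index is (a + 2*r) % n.
lemma solutionGo_eq (numbers : List Int) (hn : 2 ≤ (numbers.length : Int)) :
    ∀ (r : Nat) (a : Int), 0 ≤ a → a < (numbers.length : Int) →
      solutionGo numbers a (r + 1) =
        (PySem.List.pyGet? numbers ((a + 2 * r) % (numbers.length : Int))).getD 0 := by
  intro r
  induction r with
  | zero =>
    intro a ha0 han
    simp [solutionGo, Int.emod_eq_of_lt ha0 han]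
  | succ r ih =>
    intro a ha0 han
    have hlen : (PySem.List.slice numbers (some a) none).length
        = numbers.length - a.toNat := by
      rw [PySem.List.slice_from numbers ha0, List.length_drop]
    have hkey : ∀ a' : Int, a' = (a + 2) % (numbers.length : Int) →
        solutionGo numbers a' (r + 1) =
          (PySem.List.pyGet? numbers ((a + 2 * (r + 1 : Nat)) % (numbers.length : Int))).getD 0 := by
      intro a' ha'
      have h0 : 0 ≤ a' := ha' ▸ Int.emod_nonneg _ (by omega)
      have h1 : a' < (numbers.length : Int) := ha' ▸ Int.emod_lt_of_pos _ (by omega)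
      rw [ih a' h0 h1]
      congr 1
      rw [ha', Int.emod_add_emod]
      push_cast
      ring_nf
    rw [solutionGo, hlen, if_neg (Nat.succ_ne_zero r)]
    by_cases h2 : 3 ≤ numbers.length - a.toNat
    · rw [if_pos h2]
      exact hkey (a + 2) (by rw [Int.emod_eq_of_lt (by omega) (by omega)])
    · rw [if_neg h2]
      by_cases h3 : numbers.length - a.toNat = 2
      · rw [if_pos h3]
        exact hkey 0 (by rw [show a + 2 = (numbers.length : Int) from by omega, Int.emod_self])
      · rw [if_neg h3, if_pos (show numbers.length - a.toNat = 1 by omega)]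
        exact hkey 1 (by
          rw [show a + 2 = 1 + (numbers.length : Int) * 1 from by omega,
              Int.add_mul_emod_self_left, Int.emod_eq_of_lt (by omega) (by omega)])

-- ===== VERDICT (by name: the statement is the Claim_ definition above) =====
theorem solution_spec : Claim_equal_solution := by
  intro numbers k _ hpre
  obtain ⟨hk, hcase⟩ := hpre
  unfold Spec_solution solution solution_alt
  rcases hcase with hn | ⟨hn1, hk1⟩
  · have hn' : 2 ≤ (numbers.length : Int) := by exact_mod_cast hn
    have hfuel : k.toNat = (k.toNat - 1) + 1 := by omega
    rw [hfuel, solutionGo_eq numbers hn' (k.toNat - 1) 0 le_rfl (by omega),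
        PySem.Int.mod_eq_emod_of_pos (by omega)]
    have hx : (0 + 2 * ((k.toNat - 1 : Nat) : Int)) = 2 * (k - 1) := by omega
    rw [hx]
  · subst hk1
    rw [show (1 : Int).toNat = 0 + 1 from rfl]
    rw [solutionGo]
    simp [PySem.Int.mod, hn1]
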